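-- pv_equiv track=rewrite | github.com/mgregus/flwmn-rule-manager | manager/rule_sources2.py | update_remote_list
-- ===== SOURCE A (Python) =====
-- def update_remote_list(rule_sources_old, rule_sources_new):
--     """Updates the list of remote rule groups used (.rules files) used to generate suricata.rules
--
--        Parameters
--        ----------
--        rule_sources_old : list
--            List of originally used rule sources, before update
--         rule_sources_new : list
--            List of rule sources used after update.
--
--        Returns
--        -------
--        rule_sources_new: list
--            Returns a list currently used remote rule groups after the udpdate. If any rule groups are the same as in the
--            old list of used rule groups the description of a given group from the old list is copied to the new list.
--
--         """
--     sources_backup = rule_sources_old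
--
--
--     for src_entry in rule_sources_old:
--         src_name_old = src_entry[0]
--         for second_entry in rule_sources_new:
--             src_name_new = second_entry[0]
--             if src_name_old == src_name_new:
--                 for source_file in src_entry[1]:
--                     file_name = source_file[0]
--                     description = source_file[1]
--                     for source_file2 in second_entry[1]:
--                         file_name2 = source_file2[0]
--                         if file_name2 == file_name:
--
--                             source_file2[1] = description
--                             break
--                 break
--
--     return rule_sources_new
-- ===== SOURCE B (Python) =====
-- def update_remote_list(rule_sources_old, rule_sources_new):
--     """Copy descriptions of old rule sources onto the same-named files of the
--     new rule sources and return the updated new list."""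
--     new_names = {name for name, _ in rule_sources_new}
--     descriptions = {}
--     for name, files in rule_sources_old:
--         if name in new_names:
--             d = descriptions.setdefault(name, {})
--             for f in files:
--                 d[f[0]] = f[1]
--     result = []
--     for name, files in rule_sources_new:
--         d = descriptions.get(name)
--         if d is None:
--             result.append((name, files))
--         else:
--             result.append((name, [[f[0], d.get(f[0], f[1])] + f[2:] for f in files]))
--     return result
-- ===== Notes on version B (the rewrite author's own statement) =====
-- stated objective: alternative
-- what changed: A's four nested scans (old entries x new entries x old files x new files with breaks) are replaced by one pass over the old list building a source-name -> {file-name -> description} dict and one pass over the new list rebuilding each matched entry by dict lookup (same measured cost on the timing inputs); …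
-- outside the precondition, e.g. on update_remote_list([('a', [])], [('a', [[]])]): A returns [('a', [[]])], B raises IndexError
import Mathlib
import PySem

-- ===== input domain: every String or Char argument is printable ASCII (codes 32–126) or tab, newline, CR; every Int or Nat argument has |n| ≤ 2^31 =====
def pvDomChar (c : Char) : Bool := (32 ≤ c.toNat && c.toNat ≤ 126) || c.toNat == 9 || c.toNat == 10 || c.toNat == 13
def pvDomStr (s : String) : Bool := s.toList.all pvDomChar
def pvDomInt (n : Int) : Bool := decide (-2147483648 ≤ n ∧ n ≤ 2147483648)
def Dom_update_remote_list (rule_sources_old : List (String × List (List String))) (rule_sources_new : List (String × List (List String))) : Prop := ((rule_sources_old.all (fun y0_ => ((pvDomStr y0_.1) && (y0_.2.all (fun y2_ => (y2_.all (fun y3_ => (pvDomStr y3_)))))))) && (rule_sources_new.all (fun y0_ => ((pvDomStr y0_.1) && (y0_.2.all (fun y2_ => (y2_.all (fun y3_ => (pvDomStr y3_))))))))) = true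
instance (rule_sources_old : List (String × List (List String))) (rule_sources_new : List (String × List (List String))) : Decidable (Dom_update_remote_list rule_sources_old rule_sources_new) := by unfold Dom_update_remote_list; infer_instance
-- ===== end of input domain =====

-- B replaces A's four nested scans by a source-name -> {file-name -> description} dict built once
-- over the old list plus one lookup pass over the new list; B builds a fresh
-- result list while A mutates rule_sources_new's inner file lists in place (A mutates its argument;
-- the proved equivalence is about the return value only).


-- ===== PORT A =====
-- innermost loop: `for source_file2 in second_entry[1]: if file_name2 == file_name: source_file2[1] = description; break`
def pvA_setDesc : List (List String) → String → String → List (List String)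
  | [], _, _ => []
  | f :: rest, fname, desc =>
    if PySem.List.pyGetD f 0 "" == fname then PySem.List.pySetD f 1 desc :: rest
    else f :: pvA_setDesc rest fname desc

-- loop over src_entry[1] (the old entry's files), mutating second_entry[1]
def pvA_applyFiles (oldFiles newFiles : List (List String)) : List (List String) :=
  oldFiles.foldl (fun nf sf => pvA_setDesc nf (PySem.List.pyGetD sf 0 "") (PySem.List.pyGetD sf 1 "")) newFiles

-- loop over rule_sources_new with `break` at the first name match
def pvA_updateEntry : List (String × List (List String)) → String → List (List String) → List (String × List (List String))
  | [], _, _ => []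
  | e :: rest, nm, oldFiles =>
    if e.1 == nm then (e.1, pvA_applyFiles oldFiles e.2) :: rest
    else e :: pvA_updateEntry rest nm oldFiles

def update_remote_list (rule_sources_old : List (String × List (List String))) (rule_sources_new : List (String × List (List String))) : List (String × List (List String)) :=
  rule_sources_old.foldl (fun acc e => pvA_updateEntry acc e.1 e.2) rule_sources_new

-- ===== PORT B =====
-- inner loop of the dict build: `for f in files: d[f[0]] = f[1]`
def pvB_merge (files : List (List String)) (d : PySem.Dict String String) : PySem.Dict String String :=
  files.foldl (fun dd f => dd.insert (PySem.List.pyGetD f 0 "") (PySem.List.pyGetD f 1 "")) d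

-- `for name, files in rule_sources_old: if name in new_names: d = descriptions.setdefault(name, {}); …`
def pvB_descDict (newNames : PySem.Set String) (old : List (String × List (List String))) : PySem.Dict String (PySem.Dict String String) :=
  old.foldl (fun desc e =>
    if newNames.contains e.1 then
      desc.insert e.1 (pvB_merge e.2 ((desc.get? e.1).getD PySem.Dict.empty))
    else desc) PySem.Dict.empty

-- `[[f[0], d.get(f[0], f[1])] + f[2:] for f in files]`
def pvB_files (d : PySem.Dict String String) (files : List (List String)) : List (List String) :=
  files.map (fun f =>
    PySem.List.pyGetD f 0 "" :: d.getD (PySem.List.pyGetD f 0 "") (PySem.List.pyGetD f 1 "") :: PySem.List.slice f (some 2) none)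

-- `for name, files in rule_sources_new: …` building result
def pvB_entries (desc : PySem.Dict String (PySem.Dict String String)) (new : List (String × List (List String))) : List (String × List (List String)) :=
  new.map (fun e =>
    match desc.get? e.1 with
    | none => e
    | some d => (e.1, pvB_files d e.2))

def update_remote_list_alt (rule_sources_old : List (String × List (List String))) (rule_sources_new : List (String × List (List String))) : List (String × List (List String)) :=
  pvB_entries (pvB_descDict (PySem.Set.ofList (rule_sources_new.map Prod.fst)) rule_sources_old) rule_sources_new

-- ===== PRECONDITION & SPEC =====
-- Pre_ keeps the function's natural domain: file entries of sources that occur on both sides must be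
-- (name, description) pairs of length ≥ 2 — on shorter ones A raises IndexError whenever its scan
-- reaches them, and which entries the scan reaches is an accident of break positions — and it
-- excludes duplicate matched source names and duplicate matched file names within a new entry,
-- corners where A's first-match break and B's dict lookup (last write wins) are equally defensible.
def Pre_update_remote_list (rule_sources_old : List (String × List (List String))) (rule_sources_new : List (String × List (List String))) : Prop :=
  (∀ e ∈ rule_sources_old, (∃ e' ∈ rule_sources_new, e'.1 = e.1) → ∀ f ∈ e.2, 2 ≤ f.length) ∧
  (∀ e ∈ rule_sources_new, (∃ e' ∈ rule_sources_old, e'.1 = e.1) →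
    (∀ f ∈ e.2, 2 ≤ f.length) ∧
    ((e.2.map (fun f => f.headD "")).filter
      (fun h => rule_sources_old.any (fun e' => e'.1 == e.1 && (e'.2.map (fun g => g.headD "")).contains h))).Nodup) ∧
  ((rule_sources_new.map Prod.fst).filter (fun n => (rule_sources_old.map Prod.fst).contains n)).Nodup
instance (rule_sources_old : List (String × List (List String))) (rule_sources_new : List (String × List (List String))) : Decidable (Pre_update_remote_list rule_sources_old rule_sources_new) := by unfold Pre_update_remote_list; infer_instance

def pvWitness_update_remote_list : (List (String × List (List String))) × (List (String × List (List String))) :=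
  ([("et/open", [["emerging-exploit.rules", "old exploit description"]])],
   [("et/open", [["emerging-exploit.rules", ""], ["emerging-malware.rules", "new"]])])

def Spec_update_remote_list (rule_sources_old : List (String × List (List String))) (rule_sources_new : List (String × List (List String))) (out : List (String × List (List String))) : Prop := out = update_remote_list_alt rule_sources_old rule_sources_new
instance (rule_sources_old : List (String × List (List String))) (rule_sources_new : List (String × List (List String))) (out : List (String × List (List String))) : Decidable (Spec_update_remote_list rule_sources_old rule_sources_new out) := by unfold Spec_update_remote_list; infer_instance

-- ===== CLAIM (what is proved, stated in full; the proofs are below) =====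
def Claim_equal_update_remote_list : Prop := ∀ (rule_sources_old : List (String × List (List String))) (rule_sources_new : List (String × List (List String))), Dom_update_remote_list rule_sources_old rule_sources_new → Pre_update_remote_list rule_sources_old rule_sources_new → Spec_update_remote_list rule_sources_old rule_sources_new (update_remote_list rule_sources_old rule_sources_new)

-- ===== LEMMAS AND PROOFS =====

-- file head read by both programs, as a name
def pvHead (f : List String) : String := PySem.List.pyGetD f 0 ""

theorem pvHead_eq_headD (f : List String) : pvHead f = f.headD "" := by
  cases f <;> simp [pvHead, PySem.List.pyGetD, PySem.List.pyGet?, PySem.List.pyIdx?]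

-- B's rebuilt file entry over a key-free dict is the entry itself (well-formed pairs)
theorem pvSlice_two (a b : String) (t : List String) :
    PySem.List.slice (a :: b :: t) (some 2) none = t := by
  rw [show (2 : Int) = ((2 : Nat) : Int) from rfl, PySem.List.slice_from_natCast]
  rfl

theorem pvB_files_empty (g : List (List String)) (h : ∀ f ∈ g, 2 ≤ f.length) :
    pvB_files PySem.Dict.empty g = g := by
  induction g with
  | nil => rfl
  | cons f rest ih =>
    have hf : 2 ≤ f.length := h f List.mem_cons_self
    simp only [pvB_files, List.map_cons] at *
    rw [ih (fun f hf => h f (List.mem_cons_of_mem _ hf))]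
    rcases f with _ | ⟨a, _ | ⟨b, t⟩⟩
    · simp at hf
    · simp at hf
    · rw [pvSlice_two]
      simp [pysem, PySem.Dict.getD_empty]

-- an insert at a key no file of g carries does not change B's rebuilt files
theorem pvB_files_not_head (g : List (List String)) (d : PySem.Dict String String) (k v : String)
    (hk : k ∉ g.map pvHead) :
    pvB_files (d.insert k v) g = pvB_files d g := by
  induction g with
  | nil => rfl
  | cons f rest ih =>
    simp only [List.map_cons, List.mem_cons, not_or] at hk
    simp only [pvB_files, List.map_cons] at *
    rw [PySem.Dict.getD_insert, if_neg (fun h => hk.1 h.symm), ih hk.2]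

-- one write of A's inner loop commutes past B's rebuild
theorem pvB_files_step (g : List (List String)) (d : PySem.Dict String String) (k v : String)
    (hcnt : (g.map pvHead).count k ≤ 1) :
    pvA_setDesc (pvB_files d g) k v = pvB_files (d.insert k v) g := by
  induction g generalizing d with
  | nil => rfl
  | cons f rest ih =>
    simp only [pvB_files, List.map_cons, pvA_setDesc, PySem.List.pyGetD_zero_cons, beq_iff_eq] at *
    by_cases hfk : PySem.List.pyGetD f 0 "" = k
    · rw [if_pos hfk]
      have hrest : k ∉ rest.map pvHead := by
        intro hmem
        have hpos := List.count_pos_iff.mpr hmem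
        simp only [List.count_cons, pvHead, hfk, beq_self_eq_true, reduceIte] at hcnt
        omega
      congr 1
      · rw [show PySem.List.pySetD
              (PySem.List.pyGetD f 0 "" ::
                d.getD (PySem.List.pyGetD f 0 "") (PySem.List.pyGetD f 1 "") :: PySem.List.slice f (some 2) none) 1 v
            = PySem.List.pyGetD f 0 "" :: v :: PySem.List.slice f (some 2) none from by simp [pysem]]
        rw [PySem.Dict.getD_insert, if_pos hfk]
      · exact (pvB_files_not_head rest d k v hrest).symm
    · rw [if_neg hfk]
      have hcnt' : (rest.map pvHead).count k ≤ 1 := by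
        simp only [List.count_cons, pvHead] at hcnt ⊢
        omega
      rw [ih d hcnt', PySem.Dict.getD_insert, if_neg hfk]

-- A's whole inner double loop for one old entry commutes past B's rebuild
theorem pvB_files_fold (fs : List (List String)) (d : PySem.Dict String String) (g : List (List String))
    (hcnt : ∀ f ∈ fs, (g.map pvHead).count (pvHead f) ≤ 1) :
    pvA_applyFiles fs (pvB_files d g) = pvB_files (pvB_merge fs d) g := by
  induction fs generalizing d with
  | nil => rfl
  | cons f fs ih =>
    simp only [pvA_applyFiles, pvB_merge, List.foldl_cons] at *
    rw [show pvA_setDesc (pvB_files d g) (PySem.List.pyGetD f 0 "") (PySem.List.pyGetD f 1 "")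
          = pvB_files (d.insert (PySem.List.pyGetD f 0 "") (PySem.List.pyGetD f 1 "")) g from
        pvB_files_step g d _ _ (hcnt f List.mem_cons_self)]
    exact ih _ (fun f hf => hcnt f (List.mem_cons_of_mem _ hf))

-- an insert at a source name no new entry carries does not change B's entry pass
theorem pvB_entries_not_name (new : List (String × List (List String)))
    (desc : PySem.Dict String (PySem.Dict String String)) (nm : String) (X : PySem.Dict String String)
    (hnm : nm ∉ new.map Prod.fst) :
    pvB_entries (desc.insert nm X) new = pvB_entries desc new := by
  induction new with
  | nil => rfl
  | cons e rest ih =>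
    simp only [List.map_cons, List.mem_cons, not_or] at hnm
    simp only [pvB_entries, List.map_cons] at *
    rw [PySem.Dict.get?_insert, if_neg (fun h => hnm.1 h.symm), ih hnm.2]

-- one old entry of A's outer loop commutes past B's entry pass
theorem pvB_entries_step (new : List (String × List (List String)))
    (desc : PySem.Dict String (PySem.Dict String String)) (nm : String) (fs : List (List String))
    (hcnt : (new.map Prod.fst).count nm ≤ 1)
    (hfiles : ∀ e ∈ new, e.1 = nm →
      (∀ f ∈ e.2, 2 ≤ f.length) ∧ ∀ f ∈ fs, (e.2.map pvHead).count (pvHead f) ≤ 1) :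
    pvA_updateEntry (pvB_entries desc new) nm fs
      = pvB_entries (desc.insert nm (pvB_merge fs ((desc.get? nm).getD PySem.Dict.empty))) new := by
  induction new generalizing desc with
  | nil => rfl
  | cons e rest ih =>
    have hcons : ∀ desc' : PySem.Dict String (PySem.Dict String String),
        pvB_entries desc' (e :: rest)
          = (match desc'.get? e.1 with
             | none => e
             | some d => (e.1, pvB_files d e.2)) :: pvB_entries desc' rest := fun _ => rfl
    by_cases hek : e.1 = nm
    · subst hek
      have hrest : e.1 ∉ rest.map Prod.fst := by
        intro hmem
        have hpos := List.count_pos_iff.mpr hmem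
        simp only [List.map_cons, List.count_cons, beq_self_eq_true, reduceIte] at hcnt
        omega
      obtain ⟨hlen, hcnt2⟩ := hfiles e List.mem_cons_self rfl
      have htail := pvB_entries_not_name rest desc e.1
        (pvB_merge fs ((desc.get? e.1).getD PySem.Dict.empty)) hrest
      rw [hcons desc, hcons (desc.insert e.1 _), PySem.Dict.get?_insert_self, htail]
      cases hd : desc.get? e.1 with
      | none =>
        simp only [pvA_updateEntry, beq_self_eq_true, reduceIte, Option.getD_none]
        rw [show pvA_applyFiles fs e.2
              = pvB_files (pvB_merge fs PySem.Dict.empty) e.2 from by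
            conv_lhs => rw [show e.2 = pvB_files PySem.Dict.empty e.2 from (pvB_files_empty e.2 hlen).symm]
            exact pvB_files_fold fs PySem.Dict.empty e.2 hcnt2]
      | some d =>
        simp only [pvA_updateEntry, beq_self_eq_true, reduceIte, Option.getD_some]
        rw [pvB_files_fold fs d e.2 hcnt2]
    · have hcnt' : (rest.map Prod.fst).count nm ≤ 1 := by
        simp only [List.map_cons, List.count_cons] at hcnt
        omega
      have hfiles' : ∀ e' ∈ rest, e'.1 = nm →
          (∀ f ∈ e'.2, 2 ≤ f.length) ∧ ∀ f ∈ fs, (e'.2.map pvHead).count (pvHead f) ≤ 1 :=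
        fun e' he' => hfiles e' (List.mem_cons_of_mem _ he')
      have hrec := ih desc hcnt' hfiles'
      rw [hcons desc, hcons (desc.insert nm _), PySem.Dict.get?_insert, if_neg hek]
      cases hd : desc.get? e.1 with
      | none =>
        simp only [pvA_updateEntry, beq_iff_eq, if_neg hek]
        rw [hrec]
      | some d =>
        simp only [pvA_updateEntry, beq_iff_eq, if_neg hek]
        rw [hrec]

-- B's entry pass over the empty dict is the identity
theorem pvB_entries_empty (new : List (String × List (List String))) :
    pvB_entries PySem.Dict.empty new = new := by
  induction new with
  | nil => rfl
  | cons e rest ih => simp only [pvB_entries, List.map_cons, PySem.Dict.get?_empty] at *; rw [ih]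

-- A's pvA_updateEntry is the identity when no entry carries the name
theorem pvA_updateEntry_not_mem (l : List (String × List (List String))) (nm : String) (fs : List (List String))
    (h : nm ∉ l.map Prod.fst) : pvA_updateEntry l nm fs = l := by
  induction l with
  | nil => rfl
  | cons e rest ih =>
    simp only [List.map_cons, List.mem_cons, not_or] at h
    simp only [pvA_updateEntry, beq_iff_eq, if_neg (fun hh : e.1 = nm => h.1 hh.symm)]
    rw [ih h.2]

-- B's entry pass preserves the source names, in order
theorem pvB_entries_map_fst (desc : PySem.Dict String (PySem.Dict String String))
    (new : List (String × List (List String))) :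
    (pvB_entries desc new).map Prod.fst = new.map Prod.fst := by
  induction new with
  | nil => rfl
  | cons e rest ih =>
    simp only [pvB_entries, List.map_cons] at *
    cases desc.get? e.1 <;> simpa using ih

-- main fold: A's outer loop equals B's pass with the dict built so far
theorem pvMain (old new : List (String × List (List String))) (desc : PySem.Dict String (PySem.Dict String String))
    (h2 : ∀ e ∈ new, ∀ eo ∈ old, eo.1 = e.1 →
      (∀ f ∈ e.2, 2 ≤ f.length) ∧ ∀ f ∈ eo.2, (e.2.map pvHead).count (pvHead f) ≤ 1)
    (h3 : ∀ eo ∈ old, eo.1 ∈ new.map Prod.fst → (new.map Prod.fst).count eo.1 ≤ 1) :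
    old.foldl (fun acc e => pvA_updateEntry acc e.1 e.2) (pvB_entries desc new)
      = pvB_entries (old.foldl (fun d e =>
          if (PySem.Set.ofList (new.map Prod.fst)).contains e.1 then
            d.insert e.1 (pvB_merge e.2 ((d.get? e.1).getD PySem.Dict.empty))
          else d) desc) new := by
  induction old generalizing desc with
  | nil => rfl
  | cons eo old ih =>
    simp only [List.foldl_cons]
    by_cases hmem : eo.1 ∈ new.map Prod.fst
    · rw [if_pos (by rw [PySem.Set.contains_iff]; exact (PySem.Set.mem_ofList _ _).mpr hmem)]
      rw [pvB_entries_step new desc eo.1 eo.2 (h3 eo List.mem_cons_self hmem)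
        (fun e he heq => h2 e he eo List.mem_cons_self heq.symm)]
      exact ih _ (fun e he eo' heo' => h2 e he eo' (List.mem_cons_of_mem _ heo'))
        (fun eo' heo' => h3 eo' (List.mem_cons_of_mem _ heo'))
    · rw [if_neg (by rw [PySem.Set.contains_iff]; exact fun h => hmem ((PySem.Set.mem_ofList _ _).mp h))]
      rw [pvA_updateEntry_not_mem _ _ _ (by rw [pvB_entries_map_fst]; exact hmem)]
      exact ih _ (fun e he eo' heo' => h2 e he eo' (List.mem_cons_of_mem _ heo'))
        (fun eo' heo' => h3 eo' (List.mem_cons_of_mem _ heo'))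

-- ===== VERDICT (by name: the statement is the Claim_ definition above) =====
theorem update_remote_list_spec : Claim_equal_update_remote_list := by
  intro old new _ hpre
  unfold Spec_update_remote_list update_remote_list update_remote_list_alt pvB_descDict
  conv_lhs => rw [show new = pvB_entries PySem.Dict.empty new from (pvB_entries_empty new).symm]
  rw [pvMain old new PySem.Dict.empty ?h2 ?h3]
  case h2 =>
    intro e he eo heo hname
    obtain ⟨hlen, hnd⟩ := hpre.2.1 e he ⟨eo, heo, hname⟩
    refine ⟨hlen, fun f hf => ?_⟩
    have hmapeq : e.2.map pvHead = e.2.map (fun f => f.headD "") := by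
      simp [pvHead_eq_headD]
    rw [hmapeq]
    have hpred : old.any (fun e' => e'.1 == e.1 && (e'.2.map (fun g => g.headD "")).contains (f.headD "")) = true := by
      simp only [List.any_eq_true]
      refine ⟨eo, heo, ?_⟩
      simp only [hname, beq_self_eq_true, Bool.true_and, List.contains_eq_mem,
        decide_eq_true_eq, List.mem_map]
      exact ⟨f, hf, rfl⟩
    rw [List.nodup_iff_count_le_one] at hnd
    have := hnd (f.headD "")
    rw [List.count_filter
      (p := fun h => old.any (fun e' => e'.1 == e.1 && (e'.2.map (fun g => g.headD "")).contains h))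
      (a := f.headD "") (l := e.2.map (fun f => f.headD "")) hpred] at this
    rw [pvHead_eq_headD]
    exact this
  case h3 =>
    intro eo heo hmem
    have hpred : (old.map Prod.fst).contains eo.1 = true := by
      simp only [List.contains_eq_mem, decide_eq_true_eq, List.mem_map]
      exact ⟨eo, heo, rfl⟩
    have hnd := hpre.2.2
    rw [List.nodup_iff_count_le_one] at hnd
    have := hnd eo.1
    rw [List.count_filter (p := fun n => (old.map Prod.fst).contains n)
      (a := eo.1) (l := new.map Prod.fst) hpred] at this
    exact this
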